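-- pv_equiv track=rewrite | github.com/CenterForOpenScience/pydocx | pydocx/export/numbering_span.py | alpha_to_int
-- ===== SOURCE A (Python) =====
-- import string
--
-- def alpha_to_int(n):
--     '''
--     Given a ASCII lowercase base-26 string, return the decimal equivalent.
--
--     >>> alpha_to_int('a')
--     1
--     >>> alpha_to_int('z')
--     26
--     >>> alpha_to_int('A')
--     1
--     >>> alpha_to_int('Z')
--     26
--     >>> alpha_to_int('aa')
--     27
--     >>> alpha_to_int('az')
--     52
--     >>> alpha_to_int('ba')
--     53
--     >>> alpha_to_int('bA')
--     53
--     >>> alpha_to_int('zz')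
--     702
--     >>> alpha_to_int('zzz')
--     18278
--     '''
--     result = 0
--     for index, c in enumerate(reversed(n.lower())):
--         ascii_index = string.ascii_lowercase.find(c)
--         if ascii_index < 0:
--             raise ValueError
--         result += (ascii_index + 1) * len(string.ascii_lowercase) ** index
--     return result
-- ===== SOURCE B (Python) =====
-- def alpha_to_int(n):
--     result = 0
--     for c in n.lower():
--         if not ('a' <= c <= 'z'):
--             raise ValueError
--         result = 26 * result + (ord(c) - ord('a') + 1)
--     return result
-- ===== Notes on version B (the rewrite author's own statement) =====
-- stated objective: faster
-- what changed: Horner's method over the string left-to-right (result = 26*result + value) with the character value computed arithmetically from ord, instead of a reversed enumerate with a 26**index power and an ascii_lowercase.find lookup per character.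
import Mathlib
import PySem

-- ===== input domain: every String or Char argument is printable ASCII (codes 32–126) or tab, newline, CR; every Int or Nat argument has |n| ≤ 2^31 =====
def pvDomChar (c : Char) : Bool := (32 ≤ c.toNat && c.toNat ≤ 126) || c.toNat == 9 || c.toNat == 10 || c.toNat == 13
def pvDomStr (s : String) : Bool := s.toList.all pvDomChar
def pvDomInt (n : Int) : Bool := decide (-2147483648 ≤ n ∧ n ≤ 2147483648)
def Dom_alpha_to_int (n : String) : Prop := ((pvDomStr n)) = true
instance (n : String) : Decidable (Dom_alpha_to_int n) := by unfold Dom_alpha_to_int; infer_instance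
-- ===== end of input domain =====

-- B replaces A's reversed enumerate with 26**index powers and a per-character
-- ascii_lowercase.find lookup by a left-to-right Horner fold (result = 26*result + ord-based value).

-- ===== PORT A =====
-- string.ascii_lowercase
def pvAsciiLowercase : List Char := "abcdefghijklmnopqrstuvwxyz".toList

-- for index, c in enumerate(reversed(n.lower())): result += (find+1) * 26**index
-- (the 'raise ValueError' branch (find < 0) is excluded by Pre_alpha_to_int)
def alpha_to_int (n : String) : Int :=
  (PySem.List.enumerate (PySem.Chars.lower n.toList).reverse).foldl
    (fun result p =>
      let asciiIndex := PySem.Chars.find pvAsciiLowercase [p.2]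
      result + (asciiIndex + 1) * (PySem.Chars.len pvAsciiLowercase) ^ p.1.toNat)
    0

-- ===== PORT B =====
-- for c in n.lower(): result = 26 * result + (ord(c) - ord('a') + 1)
-- (the 'raise ValueError' branch (c outside 'a'..'z') is excluded by Pre_alpha_to_int)
def alpha_to_int_alt (n : String) : Int :=
  (PySem.Chars.lower n.toList).foldl
    (fun result c => 26 * result + ((c.toNat : Int) - 97 + 1)) 0

-- ===== PRECONDITION & SPEC =====
-- Pre_ admits exactly the inputs on which A returns: strings of ASCII letters
-- (on any other character both Pythons raise ValueError).
def Pre_alpha_to_int (n : String) : Prop :=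
  (n.toList.all (fun c => (65 ≤ c.toNat && c.toNat ≤ 90) || (97 ≤ c.toNat && c.toNat ≤ 122))) = true
instance (n : String) : Decidable (Pre_alpha_to_int n) := by unfold Pre_alpha_to_int; infer_instance

def pvWitness_alpha_to_int : String := "aZ"

def Spec_alpha_to_int (n : String) (out : Int) : Prop := out = alpha_to_int_alt n
instance (n : String) (out : Int) : Decidable (Spec_alpha_to_int n out) := by unfold Spec_alpha_to_int; infer_instance

-- ===== CLAIM (what is proved, stated in full; the proofs are below) =====
def Claim_equal_alpha_to_int : Prop := ∀ (n : String), Dom_alpha_to_int n → Pre_alpha_to_int n → Spec_alpha_to_int n (alpha_to_int n)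

-- ===== LEMMAS AND PROOFS =====

-- find on ascii_lowercase is ord-arithmetic for lowercase letters
lemma find_ascii_eq (c : Char) (h1 : 97 ≤ c.toNat) (h2 : c.toNat ≤ 122) :
    PySem.Chars.find pvAsciiLowercase [c] = (c.toNat : Int) - 97 := by
  have key : ∀ k, 97 ≤ k → k ≤ 122 →
      PySem.Chars.find pvAsciiLowercase [Char.ofNat k] = (k : Int) - 97 := by decide
  have := key c.toNat h1 h2
  rwa [Char.ofNat_toNat] at this

-- lowering an ASCII letter lands in 'a'..'z'
lemma lowerChar_range (c : Char)
    (h : ((65 ≤ c.toNat && c.toNat ≤ 90) || (97 ≤ c.toNat && c.toNat ≤ 122)) = true) :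
    97 ≤ (PySem.Chars.lowerChar c).toNat ∧ (PySem.Chars.lowerChar c).toNat ≤ 122 := by
  have key : ∀ k ≤ 122, ((65 ≤ k && k ≤ 90) || (97 ≤ k && k ≤ 122)) = true →
      97 ≤ (PySem.Chars.lowerChar (Char.ofNat k)).toNat ∧
      (PySem.Chars.lowerChar (Char.ofNat k)).toNat ≤ 122 := by decide
  have hle : c.toNat ≤ 122 := by
    simp only [Bool.or_eq_true, Bool.and_eq_true, decide_eq_true_eq] at h
    omega
  have := key c.toNat hle h
  rwa [Char.ofNat_toNat] at this

-- Horner fold with an accumulator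
lemma horner_acc (f : Char → Int) (t : List Char) : ∀ a : Int,
    t.foldl (fun r c => 26 * r + f c) a
      = a * 26 ^ t.length + t.foldl (fun r c => 26 * r + f c) 0 := by
  induction t with
  | nil => intro a; simp
  | cons c t ih =>
      intro a
      simp only [List.foldl_cons, List.length_cons]
      rw [ih (26 * a + f c), ih (26 * 0 + f c)]
      ring

-- the reversed positional sum equals the forward Horner fold (generic in the digit value f)
lemma rev_pow_eq_horner (f : Char → Int) (l : List Char) :
    (PySem.List.enumerate l.reverse).foldl
        (fun r p => r + f p.2 * 26 ^ p.1.toNat) 0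
      = l.foldl (fun r c => 26 * r + f c) 0 := by
  induction l with
  | nil => rfl
  | cons c t ih =>
      have hrev : (c :: t).reverse = t.reverse ++ [c] := by simp
      have hlen : ((0 : Int) + (t.reverse.length : Int)).toNat = t.length := by simp
      rw [hrev, PySem.List.enumerate_append, List.foldl_append]
      simp only [PySem.List.enumerate_cons, PySem.List.enumerate_nil,
        List.foldl_cons, List.foldl_nil, hlen]
      rw [horner_acc f t, ← ih]
      ring

lemma main_eq (n : String) (hpre : Pre_alpha_to_int n) :
    alpha_to_int n = alpha_to_int_alt n := by
  unfold alpha_to_int alpha_to_int_alt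
  have hmem : ∀ c ∈ PySem.Chars.lower n.toList, 97 ≤ c.toNat ∧ c.toNat ≤ 122 := by
    intro c hc
    simp only [PySem.Chars.lower, List.mem_map] at hc
    obtain ⟨c0, hc0, rfl⟩ := hc
    exact lowerChar_range c0 (by
      have := List.all_eq_true.mp hpre c0 hc0
      simpa using this)
  have hcongr : (PySem.List.enumerate (PySem.Chars.lower n.toList).reverse).foldl
      (fun result p =>
        let asciiIndex := PySem.Chars.find pvAsciiLowercase [p.2]
        result + (asciiIndex + 1) * (PySem.Chars.len pvAsciiLowercase) ^ p.1.toNat) 0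
      = (PySem.List.enumerate (PySem.Chars.lower n.toList).reverse).foldl
      (fun result p => result + (((p.2.toNat : Int) - 97 + 1)) * 26 ^ p.1.toNat) 0 := by
    apply PySem.List.foldl_congr_mem'
    intro p hp acc
    have hp2 : p.2 ∈ PySem.Chars.lower n.toList := by
      rcases (PySem.List.mem_enumerate_iff _ _ _).mp hp with ⟨k, hk, rfl⟩
      exact List.mem_reverse.mp (List.getElem_mem hk)
    obtain ⟨h1, h2⟩ := hmem _ hp2
    have hlen26 : PySem.Chars.len pvAsciiLowercase = 26 := by decide
    simp only [find_ascii_eq _ h1 h2, hlen26]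
  rw [hcongr, rev_pow_eq_horner (fun c => (c.toNat : Int) - 97 + 1)]

-- ===== VERDICT (by name: the statement is the Claim_ definition above) =====
theorem alpha_to_int_spec : Claim_equal_alpha_to_int := by
  intro n _ hpre
  unfold Spec_alpha_to_int
  exact main_eq n hpre
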